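-- pv_equiv track=rewrite | github.com/deryakarl/siricon | src/zilver/batch_distributor.py | _split_indices
-- ===== SOURCE A (Python) =====
-- def _split_indices(n: int, k: int) -> list[tuple[int, int]]:
--     """
--     Split n items across k workers into contiguous (start, end) pairs.
--
--     Items are distributed as evenly as possible; the first (n % k) workers
--     receive one extra item each.
--
--         n=10, k=3  →  [(0,4), (4,7), (7,10)]
--         n=6,  k=4  →  [(0,2), (2,4), (4,5), (5,6)]
--     """
--     chunk = n // k
--     extra = n % k
--     slices = []
--     start = 0
--     for i in range(k):
--         end = start + chunk + (1 if i < extra else 0)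
--         slices.append((start, end))
--         start = end
--     return slices
-- ===== SOURCE B (Python) =====
-- def _split_indices(n: int, k: int) -> list[tuple[int, int]]:
--     chunk, extra = divmod(n, k)
--     return [(i * chunk + min(i, extra), (i + 1) * chunk + min(i + 1, extra))
--             for i in range(k)]
-- ===== Notes on version B (the rewrite author's own statement) =====
-- stated objective: alternative
-- what changed: Replaces the threaded start/end accumulator loop with a per-index closed form: each pair is computed independently as (i*chunk + min(i,extra), (i+1)*chunk + min(i+1,extra)).
import Mathlib
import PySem

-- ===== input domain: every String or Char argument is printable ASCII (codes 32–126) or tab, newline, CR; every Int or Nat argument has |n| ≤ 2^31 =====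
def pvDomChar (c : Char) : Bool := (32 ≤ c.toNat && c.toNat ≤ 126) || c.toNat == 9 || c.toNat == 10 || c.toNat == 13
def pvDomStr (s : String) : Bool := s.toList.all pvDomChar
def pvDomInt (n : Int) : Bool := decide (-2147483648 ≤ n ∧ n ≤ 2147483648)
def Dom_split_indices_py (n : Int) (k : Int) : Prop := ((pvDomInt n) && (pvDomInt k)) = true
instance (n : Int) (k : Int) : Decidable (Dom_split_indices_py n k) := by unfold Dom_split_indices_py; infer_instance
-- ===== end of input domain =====

-- B replaces A's threaded start/end accumulator with a per-index closed form (i*chunk + min(i,extra)); alternative decomposition, same O(k) cost.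


-- ===== PORT A =====
def split_indices_py (n : Int) (k : Int) : List (Int × Int) :=
  let chunk := PySem.Int.floordiv n k
  let extra := PySem.Int.mod n k
  let r := (PySem.List.pyRange 0 k 1).foldl
    (fun (st : List (Int × Int) × Int) i =>
      let e := st.2 + chunk + (if i < extra then 1 else 0)
      (st.1 ++ [(st.2, e)], e))
    ([], 0)
  r.1

-- ===== PORT B =====
def split_indices_py_alt (n : Int) (k : Int) : List (Int × Int) :=
  let chunk := PySem.Int.floordiv n k
  let extra := PySem.Int.mod n k
  (PySem.List.pyRange 0 k 1).map
    (fun i => (i * chunk + min i extra, (i + 1) * chunk + min (i + 1) extra))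

-- ===== PRECONDITION & SPEC =====
-- Python raises ZeroDivisionError at k = 0 (in both A and B); excluded.
def Pre_split_indices_py (n : Int) (k : Int) : Prop := k ≠ 0
instance (n : Int) (k : Int) : Decidable (Pre_split_indices_py n k) := by unfold Pre_split_indices_py; infer_instance
def pvWitness_split_indices_py : Int × Int := (10, 3)

def Spec_split_indices_py (n : Int) (k : Int) (out : List (Int × Int)) : Prop := out = split_indices_py_alt n k
instance (n : Int) (k : Int) (out : List (Int × Int)) : Decidable (Spec_split_indices_py n k out) := by unfold Spec_split_indices_py; infer_instance

-- ===== CLAIM (what is proved, stated in full; the proofs are below) =====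
def Claim_equal_split_indices_py : Prop := ∀ (n : Int) (k : Int), Dom_split_indices_py n k → Pre_split_indices_py n k → Spec_split_indices_py n k (split_indices_py n k)

-- ===== LEMMAS AND PROOFS =====

-- the fold over range(m) yields B's first m pairs, and the running start equals m*chunk + min m extra
theorem pv_fold_aux (chunk extra : Int) (hex : 0 ≤ extra) (m : Nat) :
    (PySem.List.pyRange 0 (m : Int) 1).foldl
      (fun (st : List (Int × Int) × Int) i =>
        let e := st.2 + chunk + (if i < extra then 1 else 0)
        (st.1 ++ [(st.2, e)], e))
      ([], 0)
    = ((PySem.List.pyRange 0 (m : Int) 1).map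
        (fun i => (i * chunk + min i extra, (i + 1) * chunk + min (i + 1) extra)),
       (m : Int) * chunk + min (m : Int) extra) := by
  induction m with
  | zero => simp [PySem.List.pyRange_one_eq_nil, min_eq_left hex]
  | succ m ih =>
    have hsplit : PySem.List.pyRange 0 ((m + 1 : Nat) : Int) 1
        = PySem.List.pyRange 0 (m : Int) 1 ++ [(m : Int)] := by
      push_cast
      exact PySem.List.pyRange_one_succ_right (by positivity)
    rw [hsplit, List.foldl_append, List.map_append, ih]
    simp only [List.foldl_cons, List.foldl_nil, List.map_cons, List.map_nil]
    have h1 : ((m : Int) + 1) * chunk = (m : Int) * chunk + chunk := by ring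
    have hpair : ((m : Int) * chunk + min (m : Int) extra,
        (m : Int) * chunk + min (m : Int) extra + chunk + if (m : Int) < extra then 1 else 0)
        = ((m : Int) * chunk + min (m : Int) extra,
           ((m : Int) + 1) * chunk + min ((m : Int) + 1) extra) := by
      rw [Prod.mk.injEq]
      refine ⟨rfl, ?_⟩
      rw [h1]
      split_ifs with h
      · have h2 : min ((m : Int) + 1) extra = min (m : Int) extra + 1 := by omega
        rw [h2]; ring
      · have h2 : min ((m : Int) + 1) extra = min (m : Int) extra := by omega
        rw [h2]; ring
    rw [Prod.mk.injEq]
    constructor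
    · rw [List.append_cancel_left_eq]
      push_cast
      rw [hpair]
    · push_cast
      rw [h1]
      split_ifs with h
      · have h2 : min ((m : Int) + 1) extra = min (m : Int) extra + 1 := by omega
        rw [h2]; ring
      · have h2 : min ((m : Int) + 1) extra = min (m : Int) extra := by omega
        rw [h2]; ring

-- ===== VERDICT (by name: the statement is the Claim_ definition above) =====
theorem split_indices_py_spec : Claim_equal_split_indices_py := by
  intro n k _ hk
  unfold Spec_split_indices_py split_indices_py split_indices_py_alt
  rcases lt_trichotomy k 0 with h | h | h
  · simp [PySem.List.pyRange_one_eq_nil (by omega : k ≤ (0:Int))]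
  · exact absurd h hk
  · have hex : 0 ≤ PySem.Int.mod n k := by
      rw [PySem.Int.mod_eq_emod_of_pos (a := n) h]
      exact Int.emod_nonneg n (by omega)
    obtain ⟨m, rfl⟩ : ∃ m : Nat, k = (m : Int) := ⟨k.toNat, by omega⟩
    simp only [pv_fold_aux _ _ hex m]
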